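-- pv_equiv track=rewrite | github.com/Bilyant/Basics-Fundamentals | Functions/15-palindrome.py | palindrome_validator
-- ===== SOURCE A (Python) =====
-- def palindrome_validator(numbers):
--     result = []
--     for num in numbers:
--         is_Palindrome = False
--         current_num = [int(x) for x in str(num)]
--         reversed_num = list(reversed(current_num))
--         result.append(True) if current_num == reversed_num else result.append(False)
--     return '\n'.join([str(x) for x in result])
-- ===== SOURCE B (Python) =====
-- def palindrome_validator(numbers):
--     lines = []
--     for num in numbers:
--         digits = [int(x) for x in str(num)]
--         i, j = 0, len(digits) - 1
--         ok = True
--         while i < j: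
--             if digits[i] != digits[j]:
--                 ok = False
--                 break
--             i += 1
--             j -= 1
--         lines.append(str(ok))
--     return '\n'.join(lines)
-- ===== Notes on version B (the rewrite author's own statement) =====
-- stated objective: alternative
-- what changed: Replaces materialising a reversed copy of the digit list and comparing whole lists by a converging two-pointer scan that inspects only half the digits and exits on the first mismatch.
import Mathlib
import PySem

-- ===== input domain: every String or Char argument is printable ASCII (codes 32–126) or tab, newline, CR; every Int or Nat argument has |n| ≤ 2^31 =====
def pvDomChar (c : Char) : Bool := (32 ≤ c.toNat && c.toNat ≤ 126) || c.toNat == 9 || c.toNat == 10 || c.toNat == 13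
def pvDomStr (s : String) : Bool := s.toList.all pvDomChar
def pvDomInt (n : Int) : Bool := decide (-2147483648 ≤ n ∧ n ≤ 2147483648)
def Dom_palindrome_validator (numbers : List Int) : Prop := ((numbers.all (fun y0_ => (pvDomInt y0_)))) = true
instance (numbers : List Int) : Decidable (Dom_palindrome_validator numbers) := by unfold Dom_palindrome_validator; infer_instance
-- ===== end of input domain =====

-- B replaces the reversed-copy-and-compare palindrome test by a converging two-pointer scan
-- over the same digit list (alternative decomposition; same asymptotic cost).


-- ===== PORT A =====
-- [int(x) for x in str(num)]; int(x) raising (the '-' of a negative num) is the `none`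
-- of PySem.Int.ofChars?, excluded by Pre_ below; `.getD 0` only totalises the port there.
def pvDigits (num : Int) : List Int :=
  (PySem.Int.toChars num).map (fun c => (PySem.Int.ofChars? [c]).getD 0)

def palindrome_validator (numbers : List Int) : String :=
  let result : List Bool := numbers.foldl (fun result num =>
    let current_num := pvDigits num
    let reversed_num := current_num.reverse
    result ++ [decide (current_num = reversed_num)]) []
  PySem.Str.join "\n" (result.map (fun x => if x then "True" else "False"))

-- ===== PORT B =====
-- the while-loop: i, j converge inward, stop at first mismatch
def pvTwoPtr (ds : List Int) (i j : Nat) : Bool :=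
  if i < j then
    if ds.getD i 0 ≠ ds.getD j 0 then false
    else pvTwoPtr ds (i + 1) (j - 1)
  else true
termination_by j - i

def palindrome_validator_alt (numbers : List Int) : String :=
  PySem.Str.join "\n" (numbers.map (fun num =>
    let digits := pvDigits num
    if pvTwoPtr digits 0 (digits.length - 1) then "True" else "False"))

-- ===== PRECONDITION & SPEC =====
-- Pre_ excludes negative numbers: on them both Pythons raise ValueError (int('-')).
def Pre_palindrome_validator (numbers : List Int) : Prop :=
  ∀ n ∈ numbers, 0 ≤ n
instance (numbers : List Int) : Decidable (Pre_palindrome_validator numbers) := by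
  unfold Pre_palindrome_validator; infer_instance
def pvWitness_palindrome_validator : List Int := [0, 121, 10, 12321]

def Spec_palindrome_validator (numbers : List Int) (out : String) : Prop := out = palindrome_validator_alt numbers
instance (numbers : List Int) (out : String) : Decidable (Spec_palindrome_validator numbers out) := by unfold Spec_palindrome_validator; infer_instance

-- ===== CLAIM (what is proved, stated in full; the proofs are below) =====
def Claim_equal_palindrome_validator : Prop := ∀ (numbers : List Int), Dom_palindrome_validator numbers → Pre_palindrome_validator numbers → Spec_palindrome_validator numbers (palindrome_validator numbers)

-- ===== LEMMAS AND PROOFS =====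

-- the two-pointer loop decides the index-symmetry of the segment [i, j]
lemma pvTwoPtr_iff (ds : List Int) : ∀ (d i j : Nat), j - i = d →
    (pvTwoPtr ds i j = true ↔ ∀ k, i ≤ k → k ≤ j → ds.getD k 0 = ds.getD (i + j - k) 0) := by
  intro d
  induction d using Nat.strong_induction_on with
  | _ d ih =>
    intro i j hd
    rw [pvTwoPtr]
    split
    · next hij =>
      split
      · next hne =>
        refine iff_of_false (by simp) fun hall => hne ?_
        have h0 := hall i (le_refl i) (le_of_lt hij)
        have hidx : i + j - i = j := by omega
        rwa [hidx] at h0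
      · next heq =>
        rw [ne_eq, not_not] at heq
        rw [ih (j - 1 - (i + 1)) (by omega) (i + 1) (j - 1) rfl]
        constructor
        · intro h k hk1 hk2
          rcases eq_or_ne k i with rfl | hki
          · have hidx : k + j - k = j := by omega
            rw [hidx]; exact heq
          · rcases eq_or_ne k j with rfl | hkj
            · have hidx : i + k - k = i := by omega
              rw [hidx]; exact heq.symm
            · have h5 := h k (by omega) (by omega)
              have harith : i + 1 + (j - 1) - k = i + j - k := by omega
              rwa [harith] at h5
        · intro h k hk1 hk2
          have harith : i + 1 + (j - 1) - k = i + j - k := by omega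
          rw [harith]
          exact h k (by omega) (by omega)
    · next hij =>
      refine ⟨fun _ k hk1 hk2 => ?_, fun _ => rfl⟩
      have hcase : k = i ∧ k = j ∨ j < i := by omega
      rcases hcase with ⟨rfl, rfl⟩ | hji
      · congr 1; omega
      · omega

-- index-symmetry over the whole list is exactly being equal to one's reverse
lemma pal_iff_getD (ds : List Int) :
    (∀ k, 0 ≤ k → k ≤ ds.length - 1 → ds.getD k 0 = ds.getD (0 + (ds.length - 1) - k) 0)
      ↔ ds = ds.reverse := by
  constructor
  · intro h'
    apply List.ext_getElem (by simp)
    intro k hk hk'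
    have hk2 : k ≤ ds.length - 1 := by omega
    have h3 := h' k (Nat.zero_le _) hk2
    have hidx : 0 + (ds.length - 1) - k = ds.length - 1 - k := by omega
    rw [hidx, List.getD_eq_getElem ds 0 hk, List.getD_eq_getElem ds 0 (by omega)] at h3
    rw [List.getElem_reverse]
    exact h3
  · intro h' k hk0 hk
    by_cases hnil : ds.length = 0
    · obtain rfl : ds = [] := by cases ds <;> simp_all
      simp
    · have hklt : k < ds.length := by omega
      have hidx : 0 + (ds.length - 1) - k < ds.length := by omega
      rw [List.getD_eq_getElem ds 0 hklt, List.getD_eq_getElem ds 0 hidx]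
      rw [List.getElem_of_eq h' hklt, List.getElem_reverse]
      congr 1
      omega

lemma pvTwoPtr_true_iff (ds : List Int) :
    pvTwoPtr ds 0 (ds.length - 1) = true ↔ ds = ds.reverse := by
  rw [pvTwoPtr_iff ds (ds.length - 1 - 0) 0 (ds.length - 1) rfl]
  exact pal_iff_getD ds

lemma pvTwoPtr_eq_palindrome (ds : List Int) :
    pvTwoPtr ds 0 (ds.length - 1) = decide (ds = ds.reverse) := by
  by_cases hp : ds = ds.reverse
  · rw [(pvTwoPtr_true_iff ds).mpr hp]
    exact (decide_eq_true hp).symm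
  · have h1 : pvTwoPtr ds 0 (ds.length - 1) = false := by
      cases h2 : pvTwoPtr ds 0 (ds.length - 1)
      · rfl
      · exact absurd ((pvTwoPtr_true_iff ds).mp h2) hp
    rw [h1]
    exact (decide_eq_false hp).symm

-- ===== VERDICT (by name: the statement is the Claim_ definition above) =====
theorem palindrome_validator_spec : Claim_equal_palindrome_validator := by
  intro numbers _ _
  unfold Spec_palindrome_validator palindrome_validator palindrome_validator_alt
  rw [PySem.List.foldl_append_singleton_eq_map
    (fun num => decide (pvDigits num = (pvDigits num).reverse)) numbers []]
  simp only [List.nil_append, List.map_map]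
  congr 1
  apply List.map_congr_left
  intro num _
  simp only [Function.comp, pvTwoPtr_eq_palindrome]
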